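-- pv_equiv track=rewrite | github.com/kush789/15799-p1 | index_generation.py | prune_indexes
-- ===== SOURCE A (Python) =====
-- from collections import defaultdict
--
-- def prune_indexes(index_set):
--
--     _pruned_index_set = defaultdict(lambda : [])
--
--     for table, indexes in index_set.items():
--         for index in indexes:
--             _pruned_index_set[table].append(", ".join(list(index)))
--         _pruned_index_set[table] = sorted(_pruned_index_set[table], key = lambda x : len(x))
--
--     pruned_index_set = defaultdict(lambda : [])
--
--     for table, indexes in _pruned_index_set.items():
--
--         for i in range(len(indexes)):
--             add_index_to_pruned_set = True
--
--             for j in range(i + 1, len(indexes)):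
--                 if indexes[j].startswith(indexes[i]):
--                     add_index_to_pruned_set = False
--                     break
--
--             if add_index_to_pruned_set:
--                 pruned_index_set[table].append(indexes[i].split(", "))
--
--     return pruned_index_set
-- ===== SOURCE B (Python) =====
-- def prune_indexes(index_set):
--     # Prefix-set algorithm (no nested scan): collect every proper string prefix of every joined
--     # index once, then a single reverse pass keeps the last occurrence of each
--     # string that is not a proper prefix of any other.
--     result = {}
--     for table, indexes in index_set.items():
--         if not indexes:
--             continue
--         joined = sorted((", ".join(list(index)) for index in indexes), key=len)
--         proper_prefixes = set()
--         for s in joined: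
--             for k in range(len(s)):
--                 proper_prefixes.add(s[:k])
--         kept = []
--         seen = set()
--         for s in reversed(joined):
--             if s not in seen and s not in proper_prefixes:
--                 kept.append(s.split(", "))
--             seen.add(s)
--         kept.reverse()
--         result[table] = kept
--     return result
-- ===== Notes on version B (the rewrite author's own statement) =====
-- stated objective: alternative
-- what changed: Replaces the per-table nested scan (each index string tested with startswith against every later string) by a set of all proper string prefixes built once plus a single reverse pass with a seen-set that keeps the last occurrence of each non-prefix string.
import Mathlib
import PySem

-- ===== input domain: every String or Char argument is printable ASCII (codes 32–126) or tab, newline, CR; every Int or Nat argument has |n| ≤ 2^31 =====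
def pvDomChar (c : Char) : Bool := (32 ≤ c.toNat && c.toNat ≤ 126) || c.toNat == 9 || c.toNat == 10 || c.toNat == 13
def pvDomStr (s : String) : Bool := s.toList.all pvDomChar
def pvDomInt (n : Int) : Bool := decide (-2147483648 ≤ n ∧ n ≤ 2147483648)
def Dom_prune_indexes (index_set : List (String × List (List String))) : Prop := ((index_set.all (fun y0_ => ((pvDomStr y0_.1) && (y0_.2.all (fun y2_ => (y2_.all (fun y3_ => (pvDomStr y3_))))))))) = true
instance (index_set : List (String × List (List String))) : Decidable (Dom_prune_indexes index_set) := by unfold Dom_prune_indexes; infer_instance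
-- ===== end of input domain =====

-- B replaces A's per-table nested startswith scan by a prefix-set built once
-- plus one reverse pass with a seen-set (objective: alternative algorithm).

-- ===== PORT A =====
-- first loop body: append the joined index strings for one table, then sort by length
def pvAJoinRow (d : PySem.Dict String (List String)) (p : String × List (List String)) :
    PySem.Dict String (List String) :=
  d.insert p.1 (PySem.List.sorted
    (p.2.foldl (fun l ix => l ++ [PySem.Str.join ", " ix]) (d.getD p.1 []))
    (fun s => PySem.Str.len s))

-- inner 'for j … if indexes[j].startswith(indexes[i]): … break' loop (flag + break)
def pvAInner (s : String) : List String → Bool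
  | [] => true
  | t :: rest => if PySem.Str.startswith t s then false else pvAInner s rest

-- outer 'for i in range(len(indexes))' loop with the defaultdict appends
def pvALoop (t : String) (d : PySem.Dict String (List (List String))) :
    List String → PySem.Dict String (List (List String))
  | [] => d
  | s :: rest =>
    if pvAInner s rest then
      pvALoop t (d.insert t (d.getD t [] ++ [(PySem.Str.split? s ", ").getD []])) rest
    else pvALoop t d rest

def prune_indexes (index_set : List (String × List (List String))) :
    List (String × List (List String)) :=
  ((((PySem.Dict.ofList index_set).items.foldl pvAJoinRow
      PySem.Dict.empty).items).foldl (fun d p => pvALoop p.1 d p.2) PySem.Dict.empty).items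

-- ===== PORT B =====
-- the set of all proper string prefixes of the joined index strings
def pvBPrefixes (joined : List String) : PySem.Set String :=
  joined.foldl (fun P s =>
    (PySem.List.pyRange 0 (PySem.Str.len s)).foldl
      (fun P k => PySem.Set.add P (PySem.Str.slice s none (some k))) P)
    PySem.Set.empty

-- 'for s in reversed(joined)' loop with the seen-set
def pvBRev (P : PySem.Set String) : List String → PySem.Set String → List (List String)
  | [], _ => []
  | s :: rest, seen =>
    if !(PySem.Set.contains seen s) && !(PySem.Set.contains P s) then
      (PySem.Str.split? s ", ").getD [] :: pvBRev P rest (PySem.Set.add seen s)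
    else pvBRev P rest (PySem.Set.add seen s)

def prune_indexes_alt (index_set : List (String × List (List String))) :
    List (String × List (List String)) :=
  ((PySem.Dict.ofList index_set).items.foldl (fun res p =>
    if p.2.isEmpty then res
    else
      let joined := PySem.List.sorted (p.2.map (fun ix => PySem.Str.join ", " ix))
        (fun s => PySem.Str.len s)
      let kept := (pvBRev (pvBPrefixes joined) joined.reverse PySem.Set.empty).reverse
      res.insert p.1 kept) PySem.Dict.empty).items

-- ===== PRECONDITION & SPEC =====
def Spec_prune_indexes (index_set : List (String × List (List String))) (out : List (String × List (List String))) : Prop := out = prune_indexes_alt index_set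
instance (index_set : List (String × List (List String))) (out : List (String × List (List String))) : Decidable (Spec_prune_indexes index_set out) := by unfold Spec_prune_indexes; infer_instance

-- ===== CLAIM (what is proved, stated in full; the proofs are below) =====
def Claim_equal_prune_indexes : Prop := ∀ (index_set : List (String × List (List String))), Dom_prune_indexes index_set → Spec_prune_indexes index_set (prune_indexes index_set)

-- ===== LEMMAS AND PROOFS =====

-- A's per-table result, in structural form
def pvSortedJ (ixs : List (List String)) : List String :=
  PySem.List.sorted (ixs.map (fun ix => PySem.Str.join ", " ix)) (fun s => PySem.Str.len s)

def pvATable : List String → List (List String)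
  | [] => []
  | s :: rest =>
    if pvAInner s rest then (PySem.Str.split? s ", ").getD [] :: pvATable rest
    else pvATable rest

lemma pvContains_false {s : PySem.Set String} {x : String} (h : x ∉ s) :
    PySem.Set.contains s x = false := by
  rw [Bool.eq_false_iff]
  intro hc
  exact h ((PySem.Set.contains_iff s x).1 hc)

lemma pvAInner_iff (s : String) : ∀ r : List String,
    pvAInner s r = true ↔ ∀ t ∈ r, ¬ s.toList <+: t.toList
  | [] => by simp [pvAInner]
  | t :: r => by
    have hb : PySem.Str.startswith t s = true ↔ s.toList <+: t.toList := by
      rw [PySem.Str.startswith_eq]; exact PySem.Chars.startswith_iff _ _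
    unfold pvAInner
    by_cases h : s.toList <+: t.toList
    · rw [if_pos (hb.2 h)]
      simp only [Bool.false_eq_true, false_iff]
      intro hall
      exact hall t (by simp) h
    · rw [if_neg (fun hc => h (hb.1 hc))]
      rw [pvAInner_iff s r]
      simp [h]

lemma pvMem_pvBPrefixes_aux : ∀ (M : List String) (P0 : PySem.Set String) (x : String),
    x ∈ M.foldl (fun P s =>
        (PySem.List.pyRange 0 (PySem.Str.len s)).foldl
          (fun P k => PySem.Set.add P (PySem.Str.slice s none (some k))) P) P0
      ↔ x ∈ P0 ∨ ∃ t ∈ M, ∃ k : Int, 0 ≤ k ∧ k < PySem.Str.len t ∧ x = PySem.Str.slice t none (some k)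
  | [], P0, x => by simp
  | s :: M, P0, x => by
    rw [List.foldl_cons, pvMem_pvBPrefixes_aux M _ x,
      PySem.Set.mem_foldl_add (PySem.List.pyRange 0 (PySem.Str.len s))
        (fun k => PySem.Str.slice s none (some k)) P0 x]
    constructor
    · rintro ((h | ⟨k, hk, hx⟩) | ⟨t, ht, hk⟩)
      · exact Or.inl h
      · exact Or.inr ⟨s, by simp, k, (PySem.List.mem_pyRange_one.1 hk).1,
          (PySem.List.mem_pyRange_one.1 hk).2, hx⟩
      · exact Or.inr ⟨t, by simp [ht], hk⟩
    · rintro (h | ⟨t, ht, k, hk0, hk1, hx⟩)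
      · exact Or.inl (Or.inl h)
      · rcases List.mem_cons.1 ht with h | h
        · subst h; exact Or.inl (Or.inr ⟨k, PySem.List.mem_pyRange_one.2 ⟨hk0, hk1⟩, hx⟩)
        · exact Or.inr ⟨t, h, k, hk0, hk1, hx⟩

lemma pvSlice_toList (t : String) (k : Int) (hk : 0 ≤ k) :
    (PySem.Str.slice t none (some k)).toList = t.toList.take k.toNat := by
  rw [PySem.Str.toList_slice, PySem.Chars.slice_eq_listSlice, PySem.List.slice_to _ hk]

lemma pvMem_pvBPrefixes (M : List String) (x : String) :
    x ∈ pvBPrefixes M ↔ ∃ t ∈ M, x.toList <+: t.toList ∧ x.toList.length < t.toList.length := by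
  unfold pvBPrefixes
  rw [pvMem_pvBPrefixes_aux]
  constructor
  · rintro (h | ⟨t, ht, k, hk0, hk1, hx⟩)
    · simp [PySem.Set.empty] at h
    · refine ⟨t, ht, ?_, ?_⟩
      · rw [hx, pvSlice_toList t k hk0]
        exact List.take_prefix _ _
      · have hlen : k.toNat < t.toList.length := by
          rw [PySem.Str.len_eq] at hk1; omega
        rw [hx, pvSlice_toList t k hk0, List.length_take]
        omega
  · rintro ⟨t, ht, hpre, hlt⟩
    refine Or.inr ⟨t, ht, (x.toList.length : Int), by positivity, ?_, ?_⟩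
    · rw [PySem.Str.len_eq]; exact_mod_cast hlt
    · apply String.ext
      rw [pvSlice_toList t _ (by positivity)]
      rw [Int.toNat_natCast]
      exact List.prefix_iff_eq_take.1 hpre

lemma pvBRev_append (P : PySem.Set String) : ∀ (u v : List String) (seen : PySem.Set String),
    pvBRev P (u ++ v) seen = pvBRev P u seen ++ pvBRev P v (PySem.Set.update seen u)
  | [], v, seen => by simp [pvBRev, PySem.Set.update_nil]
  | s :: u, v, seen => by
    simp only [List.cons_append, pvBRev, PySem.Set.update_cons]
    by_cases h : (!(PySem.Set.contains seen s) && !(PySem.Set.contains P s)) = true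
    · rw [if_pos h, if_pos h, pvBRev_append P u v (PySem.Set.add seen s), List.cons_append]
    · rw [if_neg h, if_neg h, pvBRev_append P u v (PySem.Set.add seen s)]

lemma pvBRev_single (P seen : PySem.Set String) (s : String) :
    pvBRev P [s] seen =
      if s ∉ seen ∧ s ∉ P then [(PySem.Str.split? s ", ").getD []] else [] := by
  by_cases h1 : s ∈ seen
  · have e1 : PySem.Set.contains seen s = true := (PySem.Set.contains_iff seen s).2 h1
    simp [pvBRev, h1]
  · have e1 : PySem.Set.contains seen s = false := pvContains_false h1
    by_cases h2 : s ∈ P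
    · have e2 : PySem.Set.contains P s = true := (PySem.Set.contains_iff P s).2 h2
      simp [pvBRev, h2]
    · have e2 : PySem.Set.contains P s = false := pvContains_false h2
      simp [pvBRev, h1, h2]

lemma pvATable_ne_nil : ∀ (s : String) (r : List String), pvATable (s :: r) ≠ []
  | s, [] => by simp [pvATable, pvAInner]
  | s, t :: r => by
    by_cases h : pvAInner s (t :: r) = true
    · simp [pvATable, h]
    · rw [Bool.not_eq_true] at h
      simp only [pvATable, h, Bool.false_eq_true, if_false]
      exact pvATable_ne_nil t r

-- the per-table core: B's reverse pass over the length-sorted list equals A's scan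
lemma pvMain (L : List String) : ∀ (pre : List String),
    (pre ++ L).Pairwise (fun a b => PySem.Str.len a ≤ PySem.Str.len b) →
    (pvBRev (pvBPrefixes (pre ++ L)) L.reverse PySem.Set.empty).reverse = pvATable L := by
  induction L with
  | nil => intro pre _; simp [pvBRev, pvATable]
  | cons s r ih =>
    intro pre hp
    have hassoc : (pre ++ [s]) ++ r = pre ++ s :: r := by simp
    have hrec := ih (pre ++ [s]) (by rw [hassoc]; exact hp)
    rw [hassoc] at hrec
    rw [List.reverse_cons, pvBRev_append, List.reverse_append, pvBRev_single, hrec]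
    have hseen : ∀ x : String, x ∈ PySem.Set.update PySem.Set.empty r.reverse ↔ x ∈ r := by
      intro x
      rw [PySem.Set.mem_update]
      simp [PySem.Set.empty]
    have hlen : ∀ t ∈ pre, PySem.Str.len t ≤ PySem.Str.len s := by
      intro t ht
      exact (List.pairwise_append.1 hp).2.2 t ht s (by simp)
    have hcond : (s ∉ PySem.Set.update PySem.Set.empty r.reverse
        ∧ s ∉ pvBPrefixes (pre ++ s :: r)) ↔ pvAInner s r = true := by
      rw [pvAInner_iff]
      constructor
      · rintro ⟨hs1, hs2⟩ t ht hpre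
        rcases Nat.lt_or_ge s.toList.length t.toList.length with hlt | hge
        · exact hs2 ((pvMem_pvBPrefixes _ s).2 ⟨t, by simp [ht], hpre, hlt⟩)
        · have : s.toList = t.toList :=
            List.IsPrefix.eq_of_length hpre (le_antisymm hpre.length_le hge)
          exact hs1 ((hseen s).2 (by rw [String.ext this]; exact ht))
      · intro h
        constructor
        · intro hs
          exact h s ((hseen s).1 hs) (List.prefix_refl _)
        · intro hs
          rcases (pvMem_pvBPrefixes _ s).1 hs with ⟨t, ht, hpre, hlt⟩
          rcases List.mem_append.1 ht with ht | ht
          · have := hlen t ht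
            rw [PySem.Str.len_eq, PySem.Str.len_eq] at this
            omega
          · rcases List.mem_cons.1 ht with ht | ht
            · subst ht; omega
            · exact h t ht hpre
    by_cases hc : pvAInner s r = true
    · rw [if_pos (hcond.2 hc)]
      simp [pvATable, hc]
    · rw [Bool.not_eq_true] at hc
      rw [if_neg (by rw [← Bool.not_eq_true] at hc; exact fun hx => hc (hcond.1 hx))]
      simp [pvATable, hc]

lemma pvALoop_char (t : String) : ∀ (L : List String) (d : PySem.Dict String (List (List String))),
    pvALoop t d L = if pvATable L = [] then d else d.insert t (d.getD t [] ++ pvATable L)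
  | [], d => by simp [pvALoop, pvATable]
  | s :: r, d => by
    by_cases h : pvAInner s r = true
    · rw [show pvALoop t d (s :: r) =
        pvALoop t (d.insert t (d.getD t [] ++ [(PySem.Str.split? s ", ").getD []])) r from by
          simp [pvALoop, h]]
      rw [pvALoop_char t r]
      simp only [pvATable, h, if_true]
      by_cases hr : pvATable r = []
      · simp [hr]
      · rw [if_neg hr, if_neg (by simp), PySem.Dict.getD_insert_self,
          PySem.Dict.insert_insert_self]
        simp
    · rw [Bool.not_eq_true] at h
      rw [show pvALoop t d (s :: r) = pvALoop t d r from by simp [pvALoop, h]]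
      rw [pvALoop_char t r]
      simp [pvATable, h]

lemma pvPhase1 : ∀ (its : List (String × List (List String))) (d : PySem.Dict String (List String)),
    (its.map (fun p => p.1)).Nodup → (∀ p ∈ its, d.contains p.1 = false) →
    (its.foldl pvAJoinRow d).items = d.items ++ its.map (fun p => (p.1, pvSortedJ p.2))
  | [], d, _, _ => by simp
  | p :: its, d, hn, hf => by
    have hc : d.contains p.1 = false := hf p (by simp)
    have hn1 : p.1 ∉ its.map (fun q => q.1) := by
      rw [List.map_cons] at hn; exact (List.nodup_cons.1 hn).1
    have hn2 : (its.map (fun q => q.1)).Nodup := by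
      rw [List.map_cons] at hn; exact (List.nodup_cons.1 hn).2
    have step : pvAJoinRow d p = d.insert p.1 (pvSortedJ p.2) := by
      unfold pvAJoinRow pvSortedJ
      rw [PySem.Dict.getD_of_not_contains d [] hc,
        PySem.List.foldl_append_singleton_eq_map (fun ix => PySem.Str.join ", " ix) p.2 []]
      simp
    rw [List.foldl_cons, step,
      pvPhase1 its (d.insert p.1 (pvSortedJ p.2)) hn2 (fun q hq => by
        rw [PySem.Dict.contains_insert]
        have hne : q.1 ≠ p.1 := by
          intro he
          exact hn1 (by rw [← he]; exact List.mem_map.2 ⟨q, hq, rfl⟩)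
        simp [hne, hf q (List.mem_cons_of_mem _ hq)]),
      PySem.Dict.items_insert_of_not_contains d _ hc]
    simp

lemma pvPhase2 : ∀ (its : List (String × List (List String)))
    (d : PySem.Dict String (List (List String))),
    (its.map (fun p => p.1)).Nodup → (∀ p ∈ its, d.contains p.1 = false) →
    its.foldl (fun d p => pvALoop p.1 d (pvSortedJ p.2)) d
      = its.foldl (fun res p =>
          if p.2.isEmpty then res
          else
            let joined := PySem.List.sorted (p.2.map (fun ix => PySem.Str.join ", " ix))
              (fun s => PySem.Str.len s)
            let kept := (pvBRev (pvBPrefixes joined) joined.reverse PySem.Set.empty).reverse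
            res.insert p.1 kept) d
  | [], d, _, _ => by simp
  | p :: its, d, hn, hf => by
    have hc : d.contains p.1 = false := hf p (by simp)
    have hn1 : p.1 ∉ its.map (fun q => q.1) := by
      rw [List.map_cons] at hn; exact (List.nodup_cons.1 hn).1
    have hn2 : (its.map (fun q => q.1)).Nodup := by
      rw [List.map_cons] at hn; exact (List.nodup_cons.1 hn).2
    have step : pvALoop p.1 d (pvSortedJ p.2)
        = if p.2.isEmpty then d
          else d.insert p.1 ((pvBRev (pvBPrefixes (pvSortedJ p.2))
            (pvSortedJ p.2).reverse PySem.Set.empty).reverse) := by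
      by_cases he : p.2 = []
      · have : pvSortedJ p.2 = [] := by
          unfold pvSortedJ
          rw [PySem.List.sorted_eq_nil_iff]
          simp [he]
        rw [pvALoop_char, this]
        simp [pvATable, he]
      · have hsne : pvSortedJ p.2 ≠ [] := by
          unfold pvSortedJ
          rw [Ne, PySem.List.sorted_eq_nil_iff]
          simp [he]
        have hmain := pvMain (pvSortedJ p.2) [] (by
          simpa using PySem.List.sorted_pairwise (p.2.map (fun ix => PySem.Str.join ", " ix))
            (fun s => PySem.Str.len s))
        simp only [List.nil_append] at hmain
        rw [pvALoop_char, hmain]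
        rcases List.exists_cons_of_ne_nil hsne with ⟨a, l, hl⟩
        rw [if_neg (by rw [hl]; exact pvATable_ne_nil a l),
          if_neg (by simp [he]), PySem.Dict.getD_of_not_contains d [] hc]
        simp
    rw [List.foldl_cons, List.foldl_cons, step]
    by_cases he : p.2.isEmpty = true
    · rw [if_pos he, if_pos he]
      exact pvPhase2 its d hn2 (fun q hq => hf q (List.mem_cons_of_mem _ hq))
    · rw [if_neg he, if_neg he]
      refine pvPhase2 its _ hn2 (fun q hq => by
        rw [PySem.Dict.contains_insert]
        have hne : q.1 ≠ p.1 := by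
          intro h
          exact hn1 (by rw [← h]; exact List.mem_map.2 ⟨q, hq, rfl⟩)
        simp [hne, hf q (List.mem_cons_of_mem _ hq)])

-- ===== VERDICT (by name: the statement is the Claim_ definition above) =====
theorem prune_indexes_spec : Claim_equal_prune_indexes := by
  intro index_set _
  unfold Spec_prune_indexes prune_indexes prune_indexes_alt
  have hnd : ((PySem.Dict.ofList index_set).items.map (fun p => p.1)).Nodup := by
    have h := PySem.Dict.nodup_keys_ofList index_set
    simpa [PySem.Dict.keys] using h
  rw [pvPhase1 (PySem.Dict.ofList index_set).items PySem.Dict.empty hnd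
    (fun p _ => PySem.Dict.contains_empty p.1)]
  rw [show (PySem.Dict.empty : PySem.Dict String (List String)).items = [] from rfl,
    List.nil_append, List.foldl_map]
  simp only []
  rw [pvPhase2 (PySem.Dict.ofList index_set).items PySem.Dict.empty hnd
    (fun p _ => PySem.Dict.contains_empty p.1)]
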